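-- pv_equiv track=rewrite | github.com/jdk99-gif/s-calc | app.py | process_decimal
-- ===== SOURCE A (Python) =====
-- def sum_digits(n):
--     return sum(int(d) for d in str(n))
--
-- def reduce_to_one_digit(n):
--     while n >= 10:
--         n = sum_digits(n)
--     return n
--
-- def process_decimal(decimal_part):
--     s = str(decimal_part)
--     if len(s) % 2 != 0:
--         s += '0'
--     total = 0
--     for i in range(0, len(s), 2):
--         pair = s[i:i+2]
--         total += sum_digits(int(pair))
--     return reduce_to_one_digit(total)
-- ===== SOURCE B (Python) =====
-- def process_decimal(decimal_part):
--     # digit sum is invariant mod 9, and the pair-splitting is a no-op for it,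
--     # so the repeated digit-sum reduction is the digital root in closed form.
--     return 0 if decimal_part == 0 else (decimal_part - 1) % 9 + 1
-- ===== Notes on version B (the rewrite author's own statement) =====
-- stated objective: simpler
-- what changed: Replaces the string pair-splitting digit-sum loop and the repeated-digit-sum while-loop with the closed-form digital-root formula (a single arithmetic expression).
import Mathlib
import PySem

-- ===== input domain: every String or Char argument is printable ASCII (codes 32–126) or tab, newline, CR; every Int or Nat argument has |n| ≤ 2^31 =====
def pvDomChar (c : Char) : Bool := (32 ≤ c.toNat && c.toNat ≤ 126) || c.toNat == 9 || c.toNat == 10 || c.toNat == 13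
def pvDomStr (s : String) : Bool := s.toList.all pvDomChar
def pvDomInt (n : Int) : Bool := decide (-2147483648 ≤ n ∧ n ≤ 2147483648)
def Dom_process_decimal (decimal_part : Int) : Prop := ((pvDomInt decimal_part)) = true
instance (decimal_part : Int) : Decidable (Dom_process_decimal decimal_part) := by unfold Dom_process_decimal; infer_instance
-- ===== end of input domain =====

-- B replaces A's string pair-splitting digit-sum loop and repeated digit-sum
-- reduction by the closed-form digital-root formula (simpler: one expression).


-- ===== PORT A =====
-- sum(int(d) for d in str(n)); int(d) is PySem.Int.ofChars? [d] — the `.getD 0`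
-- default is never reached inside Pre_ (every character of str(n) for n ≥ 0 is a
-- digit); where int(d) raises (the '-' of a negative n) is excluded by Pre_.
def pySumDigits (n : Int) : Int :=
  ((PySem.Int.toChars n).map (fun d => (PySem.Int.ofChars? [d]).getD 0)).sum

-- the while-loop of reduce_to_one_digit; fuel n.toNat is a totality guard only:
-- each iteration strictly decreases n while n ≥ 10, so the fuel always suffices.
def pyReduce : Nat → Int → Int
  | 0, n => n
  | f + 1, n => if 10 ≤ n then pyReduce f (pySumDigits n) else n

def reduce_to_one_digit (n : Int) : Int := pyReduce n.toNat n

def process_decimal (decimal_part : Int) : Int :=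
  let s0 := PySem.Int.toChars decimal_part
  let s := if s0.length % 2 ≠ 0 then s0 ++ ['0'] else s0
  let total := (PySem.List.pyRange 0 (s.length : Int) 2).foldl
    (fun total i =>
      total + pySumDigits ((PySem.Int.ofChars? (PySem.List.slice s (some i) (some (i + 2)))).getD 0))
    0
  reduce_to_one_digit total

-- ===== PORT B =====
def process_decimal_alt (decimal_part : Int) : Int :=
  if decimal_part = 0 then 0 else PySem.Int.mod (decimal_part - 1) 9 + 1

-- ===== PRECONDITION & SPEC =====
-- A raises ValueError on every negative input (int('-') while summing the digits
-- of a negative pair), so Pre_ admits exactly the nonnegative inputs.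
def Pre_process_decimal (decimal_part : Int) : Prop := 0 ≤ decimal_part
instance (decimal_part : Int) : Decidable (Pre_process_decimal decimal_part) := by
  unfold Pre_process_decimal; infer_instance

def pvWitness_process_decimal : Int := 10

def Spec_process_decimal (decimal_part : Int) (out : Int) : Prop := out = process_decimal_alt decimal_part
instance (decimal_part : Int) (out : Int) : Decidable (Spec_process_decimal decimal_part out) := by unfold Spec_process_decimal; infer_instance

-- ===== CLAIM (what is proved, stated in full; the proofs are below) =====
def Claim_equal_process_decimal : Prop := ∀ (decimal_part : Int), Dom_process_decimal decimal_part → Pre_process_decimal decimal_part → Spec_process_decimal decimal_part (process_decimal decimal_part)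

-- ===== LEMMAS AND PROOFS =====

-- digit sum over Nat.digits, the reference quantity
def dsumN (m : Nat) : Nat := (Nat.digits 10 m).sum

-- value of int(c) for a digit character
lemma pyIntChar_digit : ∀ d : Nat, d < 10 → (PySem.Int.ofChars? [Nat.digitChar d]).getD 0 = (d : Int) := by
  decide

lemma dsumN_lt_ten {m : Nat} (h : m < 10) : dsumN m = m := by
  rcases Nat.eq_zero_or_pos m with h0 | h0
  · simp [dsumN, h0]
  · simp [dsumN, Nat.digits_def' (by norm_num : (1:Nat) < 10) h0,
      Nat.mod_eq_of_lt h, Nat.div_eq_of_lt h]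

lemma dsumN_ge_ten {m : Nat} (h : 10 ≤ m) : dsumN m = m % 10 + dsumN (m / 10) := by
  simp [dsumN, Nat.digits_def' (by norm_num : (1:Nat) < 10) (by omega : 0 < m)]

lemma dsumN_le (m : Nat) : dsumN m ≤ m := by
  induction m using Nat.strong_induction_on with
  | _ m ih =>
    by_cases h : m < 10
    · simp [dsumN_lt_ten h]
    · push Not at h
      have h1 : m / 10 < m := Nat.div_lt_self (by omega) (by norm_num)
      have := ih (m / 10) h1
      have h2 : m % 10 + 10 * (m / 10) = m := Nat.mod_add_div m 10
      rw [dsumN_ge_ten h]; omega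

lemma dsumN_lt {m : Nat} (h : 10 ≤ m) : dsumN m < m := by
  have h1 := dsumN_le (m / 10)
  have h2 : m % 10 + 10 * (m / 10) = m := Nat.mod_add_div m 10
  have h3 : 1 ≤ m / 10 := by omega
  rw [dsumN_ge_ten h]; omega

lemma dsumN_pos {m : Nat} (h : 0 < m) : 0 < dsumN m := by
  induction m using Nat.strong_induction_on with
  | _ m ih =>
    by_cases h10 : m < 10
    · simp [dsumN_lt_ten h10]; omega
    · push Not at h10
      rw [dsumN_ge_ten h10]
      rcases Nat.eq_zero_or_pos (m % 10) with h0 | h0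
      · have := ih (m / 10) (Nat.div_lt_self (by omega) (by norm_num)) (by omega)
        omega
      · omega

lemma dsumN_modEq (m : Nat) : dsumN m ≡ m [MOD 9] :=
  (Nat.modEq_digits_sum 9 10 (by norm_num) m).symm

-- character-level sum of a list, the bridge between toDigits and dsumN
def sumVals (cs : List Char) : Int :=
  (cs.map (fun d => (PySem.Int.ofChars? [d]).getD 0)).sum

def allDigits (cs : List Char) : Prop := ∀ c ∈ cs, ∃ d, d < 10 ∧ c = Nat.digitChar d

lemma toDigitsCore_sumVals : ∀ (f n : Nat) (l : List Char), n ≤ f →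
    sumVals (Nat.toDigitsCore 10 f n l) = (dsumN n : Int) + sumVals l ∧
    (allDigits l → allDigits (Nat.toDigitsCore 10 f n l)) := by
  intro f
  induction f with
  | zero =>
    intro n l hn
    have : n = 0 := by omega
    subst this
    simp [Nat.toDigitsCore, dsumN]
  | succ f ih =>
    intro n l hn
    rw [Nat.toDigitsCore]
    by_cases h : n / 10 = 0
    · have hn10 : n < 10 := by omega
      simp only [h, if_pos]
      constructor
      · have : n % 10 = n := Nat.mod_eq_of_lt hn10
        simp [sumVals, this, pyIntChar_digit n hn10, dsumN_lt_ten hn10]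
      · intro hl c hc
        rcases List.mem_cons.mp hc with hc | hc
        · exact ⟨n % 10, Nat.mod_lt _ (by norm_num), hc ▸ rfl⟩
        · exact hl c hc
    · simp only [h, ite_false]
      have hrec : n / 10 ≤ f := by
        have := Nat.div_lt_self (by omega : 0 < n) (by norm_num : 1 < 10)
        omega
      obtain ⟨h1, h2⟩ := ih (n / 10) ((n % 10).digitChar :: l) hrec
      constructor
      · rw [h1]
        have hd : sumVals ((n % 10).digitChar :: l) = (↑(n % 10) : Int) + sumVals l := by
          simp [sumVals, pyIntChar_digit (n % 10) (Nat.mod_lt _ (by norm_num))]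
        have hds : ((dsumN n : Nat) : Int) = ((n % 10 : Nat) : Int) + ((dsumN (n / 10) : Nat) : Int) := by
          rw [dsumN_ge_ten (by omega)]; push_cast; ring
        rw [hd, hds]
        ring
      · intro hl
        refine h2 ?_
        intro c hc
        rcases List.mem_cons.mp hc with hc | hc
        · exact ⟨n % 10, Nat.mod_lt _ (by norm_num), hc ▸ rfl⟩
        · exact hl c hc

lemma toDigits_sumVals (m : Nat) : sumVals (Nat.toDigits 10 m) = (dsumN m : Int) := by
  have := (toDigitsCore_sumVals (m + 1) m [] (by omega)).1
  simpa [Nat.toDigits, sumVals] using this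

lemma toDigits_allDigits (m : Nat) : allDigits (Nat.toDigits 10 m) := by
  exact (toDigitsCore_sumVals (m + 1) m [] (by omega)).2 (by intro c hc; simp at hc)

lemma pySumDigits_natCast (m : Nat) : pySumDigits (m : Int) = (dsumN m : Int) := by
  unfold pySumDigits
  have h : PySem.Int.toChars (m : Int) = Nat.toDigits 10 m := by
    simp [PySem.Int.toChars]
  rw [h]
  exact toDigits_sumVals m

-- the digital root in closed form
def droot (m : Nat) : Int := if m = 0 then 0 else ((m : Int) - 1) % 9 + 1

lemma droot_congr {a b : Nat} (hmod : a ≡ b [MOD 9]) (hz : a = 0 ↔ b = 0) :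
    droot a = droot b := by
  unfold droot
  by_cases ha : a = 0
  · simp [ha, hz.mp ha]
  · have hb : ¬ b = 0 := fun h => ha (hz.mpr h)
    simp only [ha, hb, ite_false]
    have h1 : (a : Int) % 9 = (b : Int) % 9 := by
      have h0 : a % 9 = b % 9 := hmod
      have := congrArg (fun k : Nat => (k : Int)) h0
      push_cast at this
      exact this
    have h2 : ((a : Int) - 1) ≡ ((b : Int) - 1) [ZMOD 9] := Int.ModEq.sub_right 1 h1
    rw [Int.ModEq] at h2
    rw [h2]

lemma droot_lt_ten {m : Nat} (h : m < 10) : droot m = (m : Int) := by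
  unfold droot
  by_cases h0 : m = 0
  · simp [h0]
  · simp only [h0, ite_false]
    rw [Int.emod_eq_of_lt (by omega) (by omega)]
    ring

lemma pyReduce_eq_droot : ∀ (m f : Nat), m ≤ f → pyReduce f (m : Int) = droot m := by
  intro m
  induction m using Nat.strong_induction_on with
  | _ m ih =>
    intro f hf
    by_cases h : m < 10
    · cases f with
      | zero =>
        have : m = 0 := by omega
        subst this
        simp [pyReduce, droot]
      | succ f =>
        rw [pyReduce]
        rw [if_neg (by exact_mod_cast by omega : ¬ (10 : Int) ≤ (m : Int))]
        exact (droot_lt_ten h).symm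
    · push Not at h
      cases f with
      | zero => omega
      | succ f =>
        rw [pyReduce]
        rw [if_pos (by exact_mod_cast h : (10 : Int) ≤ (m : Int))]
        rw [pySumDigits_natCast]
        have hlt : dsumN m < m := dsumN_lt h
        have := ih (dsumN m) hlt f (by omega)
        rw [this]
        exact droot_congr (dsumN_modEq m) (by
          constructor
          · intro h0
            exfalso
            have := dsumN_pos (by omega : 0 < m)
            omega
          · intro h0; omega)

-- slice of a pair list: the two pair facts A's loop body needs
lemma pair_ofChars : ∀ da : Nat, da < 10 → ∀ db : Nat, db < 10 →
    (PySem.Int.ofChars? [Nat.digitChar da, Nat.digitChar db]).getD 0 = (10 * da + db : Int) := by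
  decide

lemma pySumDigits_pair : ∀ da : Nat, da < 10 → ∀ db : Nat, db < 10 →
    pySumDigits (10 * da + db : Int) = (da + db : Int) := by
  intro da hda db hdb
  have h : ((10 * da + db : Nat) : Int) = (10 * da + db : Int) := by push_cast; ring
  rw [← h, pySumDigits_natCast]
  by_cases h0 : da = 0
  · subst h0
    simp [dsumN_lt_ten hdb]
  · have h10 : 10 ≤ 10 * da + db := by omega
    rw [dsumN_ge_ten h10]
    have h1 : (10 * da + db) % 10 = db := by omega
    have h2 : (10 * da + db) / 10 = da := by omega
    rw [h1, h2, dsumN_lt_ten hda]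
    push_cast; ring

lemma slice_take_two (cs : List Char) (h : 2 ≤ cs.length) :
    PySem.List.slice cs (some 0) (some 2) = cs.take 2 := by
  simp only [PySem.List.slice, PySem.List.clampIdx]
  norm_num
  have h2 : min 2 cs.length = 2 := by omega
  simp [h2]

lemma slice_shift_two (a b : Char) (cs : List Char) (j : Nat) (hj : 2 * j + 2 ≤ cs.length) :
    PySem.List.slice (a :: b :: cs) (some (2 * ((j : Int) + 1))) (some (2 * ((j : Int) + 1) + 2)) =
    PySem.List.slice cs (some (2 * (j : Int))) (some (2 * (j : Int) + 2)) := by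
  simp only [PySem.List.slice, PySem.List.clampIdx]
  have h1 : ¬ (2 * ((j : Int) + 1) < 0) := by omega
  have h2 : ¬ (2 * ((j : Int) + 1) + 2 < 0) := by omega
  have h3 : ¬ (2 * (j : Int) < 0) := by omega
  have h4 : ¬ (2 * (j : Int) + 2 < 0) := by omega
  simp only [h1, h2, h3, h4, if_false]
  have e1 : (2 * ((j : Int) + 1)).toNat = 2 * j + 2 := by omega
  have e2 : (2 * ((j : Int) + 1) + 2).toNat = 2 * j + 4 := by omega
  have e3 : (2 * (j : Int)).toNat = 2 * j := by omega
  have e4 : (2 * (j : Int) + 2).toNat = 2 * j + 2 := by omega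
  rw [e1, e2, e3, e4]
  simp only [List.length_cons]
  have m1 : min (2 * j + 2) (cs.length + 1 + 1) = 2 * j + 2 := by omega
  have m2 : min (2 * j + 4) (cs.length + 1 + 1) = min (2 * j + 2) cs.length + 2 := by omega
  have m3 : min (2 * j) cs.length = 2 * j := by omega
  rw [m1, m2, m3]
  have hd : (a :: b :: cs).drop (2 * j + 2) = cs.drop (2 * j) := by simp
  rw [hd]
  congr 1
  omega

-- A's pair loop computes the character digit sum
lemma pair_loop_aux : ∀ (N : Nat) (cs : List Char), cs.length ≤ N → allDigits cs → 2 ∣ cs.length →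
    ∀ (t : Int),
    (List.range (cs.length / 2)).foldl
      (fun (t : Int) (j : Nat) =>
        t + pySumDigits ((PySem.Int.ofChars? (PySem.List.slice cs (some (2 * (j : Int))) (some (2 * (j : Int) + 2)))).getD 0))
      t = t + sumVals cs := by
  intro N
  induction N with
  | zero =>
    intro cs hN _ _ t
    have : cs = [] := List.eq_nil_of_length_eq_zero (by omega)
    subst this
    simp [sumVals]
  | succ N ih =>
    intro cs hN hd hlen t
    match cs, hlen with
    | [], _ => simp [sumVals]
    | [a], hlen => simp at hlen
    | a :: b :: cs, hlen =>
      obtain ⟨da, hda, rfl⟩ := hd a (by simp)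
      obtain ⟨db, hdb, rfl⟩ := hd b (by simp)
      have hlen' : 2 ∣ cs.length := by
        simp at hlen; omega
      have hl2 : (Nat.digitChar da :: Nat.digitChar db :: cs).length / 2 = cs.length / 2 + 1 := by
        simp; omega
      rw [hl2, List.range_succ_eq_map, List.foldl_cons, List.foldl_map]
      have hfirst : PySem.List.slice (Nat.digitChar da :: Nat.digitChar db :: cs) (some (2 * ((0:Nat) : Int))) (some (2 * ((0:Nat) : Int) + 2)) = [Nat.digitChar da, Nat.digitChar db] := by
        have := slice_take_two (Nat.digitChar da :: Nat.digitChar db :: cs) (by simp)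
        simpa using this
      rw [hfirst, pair_ofChars da hda db hdb, pySumDigits_pair da hda db hdb]
      have hshift : ∀ t' : Int, (List.range (cs.length / 2)).foldl
          (fun (t' : Int) (j : Nat) => t' + pySumDigits ((PySem.Int.ofChars? (PySem.List.slice (Nat.digitChar da :: Nat.digitChar db :: cs) (some (2 * ((j.succ : Nat) : Int))) (some (2 * ((j.succ : Nat) : Int) + 2)))).getD 0))
          t' = (List.range (cs.length / 2)).foldl
          (fun (t' : Int) (j : Nat) => t' + pySumDigits ((PySem.Int.ofChars? (PySem.List.slice cs (some (2 * (j : Int))) (some (2 * (j : Int) + 2)))).getD 0)) t' := by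
        intro t'
        apply PySem.List.foldl_congr_mem
        intro acc x hx
        have hx' : x < cs.length / 2 := List.mem_range.mp hx
        have hcast : ((x.succ : Nat) : Int) = (x : Int) + 1 := by push_cast; ring
        rw [hcast, slice_shift_two _ _ _ _ (by omega)]
      rw [hshift]
      rw [ih cs (by simp at hN ⊢; omega) (fun c hc => hd c (by simp [hc])) hlen']
      have hsv : sumVals (Nat.digitChar da :: Nat.digitChar db :: cs) =
          (da : Int) + (db : Int) + sumVals cs := by
        simp [sumVals, pyIntChar_digit da hda, pyIntChar_digit db hdb]
        ring
      rw [hsv]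
      ring

-- pyRange 0 (2k) 2 is the doubled range
lemma pyRange_two (k : Nat) :
    PySem.List.pyRange 0 ((2 * k : Nat) : Int) 2 = (List.range k).map (fun j : Nat => (2 * (j : Int))) := by
  simp only [PySem.List.pyRange]
  rw [if_neg (by norm_num)]
  by_cases hk : k = 0
  · subst hk; simp
  · rw [if_pos (by norm_num), if_pos (by push_cast; omega)]
    have hc : ((((2 * k : Nat) : Int) - 0 + 2 - 1) / 2).toNat = k := by
      have : (((2 * k : Nat) : Int) - 0 + 2 - 1) = 2 * (k : Int) + 1 := by push_cast; ring
      rw [this]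
      omega
    rw [hc]
    apply List.map_congr_left
    intro j hj
    ring

-- the str(n) of a nonnegative n
lemma toChars_nonneg {n : Int} (h : 0 ≤ n) :
    PySem.Int.toChars n = Nat.toDigits 10 n.toNat := by
  simp [PySem.Int.toChars, not_lt.mpr h]

-- main equivalence on nonnegative inputs
lemma process_eq (m : Nat) : process_decimal (m : Int) = droot m := by
  have hall0 := toDigits_allDigits m
  have hsum0 := toDigits_sumVals m
  have main : ∀ (s : List Char), allDigits s → sumVals s = (dsumN m : Int) → 2 ∣ s.length →
      reduce_to_one_digit
        ((PySem.List.pyRange 0 (s.length : Int) 2).foldl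
          (fun total i =>
            total + pySumDigits ((PySem.Int.ofChars? (PySem.List.slice s (some i) (some (i + 2)))).getD 0))
          0) = droot m := by
    intro s hall hsum hdvd
    obtain ⟨k, hk⟩ := hdvd
    have hloop := pair_loop_aux s.length s le_rfl hall ⟨k, hk⟩ 0
    rw [hk] at hloop ⊢
    have hdiv : 2 * k / 2 = k := by omega
    rw [hdiv] at hloop
    rw [pyRange_two, List.foldl_map, hloop, zero_add, hsum]
    unfold reduce_to_one_digit
    rw [Int.toNat_natCast]
    rw [pyReduce_eq_droot (dsumN m) (dsumN m) le_rfl]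
    refine droot_congr (dsumN_modEq m) ⟨?_, ?_⟩
    · intro h0
      by_contra hm0
      have := dsumN_pos (Nat.pos_of_ne_zero hm0)
      omega
    · intro h0
      simp [h0, dsumN]
  unfold process_decimal
  rw [toChars_nonneg (Int.natCast_nonneg m), Int.toNat_natCast]
  dsimp only
  by_cases hpar : (Nat.toDigits 10 m).length % 2 ≠ 0
  · rw [if_pos hpar]
    refine main _ ?_ ?_ ?_
    · intro c hc
      rcases List.mem_append.mp hc with hc | hc
      · exact hall0 c hc
      · refine ⟨0, by norm_num, ?_⟩
        simpa using hc
    · simp only [sumVals, List.map_append, List.sum_append]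
      rw [show ((['0'] : List Char).map (fun d => (PySem.Int.ofChars? [d]).getD 0)).sum = 0 by decide]
      simpa [sumVals] using hsum0
    · simp only [List.length_append, List.length_cons, List.length_nil]
      omega
  · rw [if_neg hpar]
    exact main _ hall0 hsum0 (by omega)

lemma alt_eq_droot {n : Int} (h : 0 ≤ n) : process_decimal_alt n = droot n.toNat := by
  unfold process_decimal_alt droot
  by_cases h0 : n = 0
  · simp [h0]
  · rw [if_neg h0, if_neg (by omega)]
    rw [PySem.Int.mod_eq_emod_of_pos (by norm_num)]
    congr 2
    omega

-- ===== VERDICT (by name: the statement is the Claim_ definition above) =====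
theorem process_decimal_spec : Claim_equal_process_decimal := by
  intro n _ hpre
  unfold Spec_process_decimal
  unfold Pre_process_decimal at hpre
  rw [alt_eq_droot hpre]
  have hm : n = ((n.toNat : Nat) : Int) := by omega
  conv_lhs => rw [hm]
  exact process_eq n.toNat
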